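-- pv_equiv track=rewrite | github.com/bposantos/CNS-to-Default-PDB-Converter | convert_pdb.py | remove_conect_lines_except_last_model
-- ===== SOURCE A (Python) =====
-- def remove_conect_lines_except_last_model(lines):
--     model_indices = [i for i, line in enumerate(lines) if line.startswith("MODEL")]
--
--     if len(model_indices) < 2:
--         return lines
--
--     for i in range(len(model_indices) - 1):
--         start_index = model_indices[i]
--         end_index = model_indices[i + 1]
--         for j in range(start_index, end_index):
--             if lines[j].startswith("CONECT"):
--                 lines[j] = ""
--
--     return lines
-- ===== SOURCE B (Python) =====
-- def remove_conect_lines_except_last_model(lines):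
--     last = -1
--     for i, line in enumerate(lines):
--         if line.startswith("MODEL"):
--             last = i
--     seen = False
--     for i, line in enumerate(lines):
--         if line.startswith("MODEL"):
--             seen = True
--         if seen and i < last and line.startswith("CONECT"):
--             lines[i] = ""
--     return lines
-- ===== Notes on version B (the rewrite author's own statement) =====
-- stated objective: simpler
-- what changed: Replaces A's precomputed model-index table and nested pair loops with one scan that records the last MODEL index plus one single pass using a seen_model flag (no len<2 guard, no index list).
import Mathlib
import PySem

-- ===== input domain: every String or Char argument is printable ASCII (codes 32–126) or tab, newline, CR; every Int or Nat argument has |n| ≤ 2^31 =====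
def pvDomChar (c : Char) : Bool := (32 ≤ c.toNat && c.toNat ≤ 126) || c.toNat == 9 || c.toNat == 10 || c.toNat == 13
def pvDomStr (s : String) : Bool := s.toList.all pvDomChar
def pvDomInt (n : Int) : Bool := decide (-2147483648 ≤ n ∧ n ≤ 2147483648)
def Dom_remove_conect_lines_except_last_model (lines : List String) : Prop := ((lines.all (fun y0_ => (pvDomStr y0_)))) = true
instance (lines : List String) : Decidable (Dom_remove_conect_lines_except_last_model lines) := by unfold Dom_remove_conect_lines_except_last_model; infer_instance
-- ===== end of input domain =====

-- B replaces A's model-index table and nested pair loops by a last-MODEL scan plus one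
-- flagged single pass (simpler decomposition); equivalence is about the return value
-- (in Python both A and B blank lines of the argument list in place).


-- ===== PORT A =====
def remove_conect_lines_except_last_model (lines : List String) : List String :=
  let model_indices : List Int :=
    ((PySem.List.enumerate lines).filter
      (fun p => PySem.Str.startswith p.2 "MODEL")).map (fun p => p.1)
  if model_indices.length < 2 then lines
  else
    (PySem.List.pyRange 0 ((model_indices.length : Int) - 1) 1).foldl
      (fun ls i =>
        let start_index := PySem.List.pyGetD model_indices i 0
        let end_index := PySem.List.pyGetD model_indices (i + 1) 0
        (PySem.List.pyRange start_index end_index 1).foldl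
          (fun ls2 j =>
            if PySem.Str.startswith (PySem.List.pyGetD ls2 j "") "CONECT"
            then PySem.List.pySetD ls2 j "" else ls2) ls)
      lines

-- ===== PORT B =====
def remove_conect_lines_except_last_model_alt (lines : List String) : List String :=
  let last : Int :=
    (PySem.List.enumerate lines).foldl
      (fun acc p => if PySem.Str.startswith p.2 "MODEL" then p.1 else acc) (-1)
  ((PySem.List.enumerate lines).foldl
      (fun (st : List String × Bool) p =>
        let seen := st.2 || PySem.Str.startswith p.2 "MODEL"
        if seen && decide (p.1 < last) && PySem.Str.startswith p.2 "CONECT"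
        then (st.1 ++ [""], seen) else (st.1 ++ [p.2], seen))
      ([], false)).1

-- ===== PRECONDITION & SPEC =====
def Spec_remove_conect_lines_except_last_model (lines : List String) (out : List String) : Prop := out = remove_conect_lines_except_last_model_alt lines
instance (lines : List String) (out : List String) : Decidable (Spec_remove_conect_lines_except_last_model lines out) := by unfold Spec_remove_conect_lines_except_last_model; infer_instance

-- ===== CLAIM (what is proved, stated in full; the proofs are below) =====
def Claim_equal_remove_conect_lines_except_last_model : Prop := ∀ (lines : List String), Dom_remove_conect_lines_except_last_model lines → Spec_remove_conect_lines_except_last_model lines (remove_conect_lines_except_last_model lines)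

-- ===== LEMMAS AND PROOFS =====

-- model positions of `lines`, as A computes them
def pvModels (lines : List String) : List Int :=
  ((PySem.List.enumerate lines).filter
    (fun p => PySem.Str.startswith p.2 "MODEL")).map (fun p => p.1)

-- body of A's inner loop
def pvInner (ls2 : List String) (j : Int) : List String :=
  if PySem.Str.startswith (PySem.List.pyGetD ls2 j "") "CONECT"
  then PySem.List.pySetD ls2 j "" else ls2

-- pointwise description of B's flagged pass
def pvBspec (last : Int) : List String → Int → Bool → List String
  | [], _, _ => []
  | x :: xs, s, b =>
    let seen := b || PySem.Str.startswith x "MODEL"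
    (if seen && decide (s < last) && PySem.Str.startswith x "CONECT" then "" else x)
      :: pvBspec last xs (s + 1) seen

theorem pv_C_empty : PySem.Str.startswith "" "CONECT" = false := by decide

theorem pv_inner_get (n : Nat) : ∀ (a b : Int), 0 ≤ a → (b - a).toNat ≤ n →
    ∀ (ls : List String) (k : Nat),
    ((PySem.List.pyRange a b 1).foldl pvInner ls)[k]? =
      if a ≤ (k : Int) ∧ (k : Int) < b ∧
          PySem.Str.startswith (ls.getD k "") "CONECT" = true
      then some "" else ls[k]? := by
  induction n with
  | zero =>
    intro a b ha hn ls k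
    rw [PySem.List.pyRange_one_eq_nil (by omega), List.foldl_nil, if_neg (by omega)]
  | succ n ih =>
    intro a b ha hn ls k
    by_cases hab : a < b
    · rw [PySem.List.pyRange_one_cons hab, List.foldl_cons,
        ih (a + 1) b (by omega) (by omega)]
      have hset : ∀ m : Nat, (PySem.List.pySetD ls a "")[m]? =
          if a = (m : Int) ∧ m < ls.length then some "" else ls[m]? := by
        intro m
        rw [PySem.List.pySetD_of_nonneg ls "" ha, List.getElem?_set]
        by_cases hm : a.toNat = m
        · subst hm
          by_cases hl : a.toNat < ls.length
          · rw [if_pos rfl, if_pos hl, if_pos ⟨by omega, hl⟩]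
          · rw [if_pos rfl, if_neg hl, if_neg (by omega), List.getElem?_eq_none (by omega)]
        · rw [if_neg hm, if_neg (by omega)]
      by_cases hk : a = (k : Int)
      · -- the head iteration is the one (possibly) writing index k
        rw [if_neg (by omega)]
        have hg : PySem.List.pyGetD ls a "" = ls.getD k "" := by
          rw [hk, PySem.List.pyGetD_natCast]
        unfold pvInner
        rw [hg]
        by_cases hC : PySem.Str.startswith (ls.getD k "") "CONECT" = true
        · have hlen : k < ls.length := by
            by_contra hcon
            rw [List.getD_eq_getElem?_getD, List.getElem?_eq_none (by omega)] at hC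
            exact absurd hC (by decide)
          rw [if_pos hC, hset k, if_pos ⟨hk, hlen⟩, if_pos ⟨by omega, by omega, hC⟩]
        · rw [if_neg hC, if_neg (by tauto)]
      · -- head iteration does not touch index k
        have hGe : (pvInner ls a)[k]? = ls[k]? := by
          unfold pvInner
          split
          · rw [hset k, if_neg (by omega)]
          · rfl
        have hCd : (pvInner ls a).getD k "" = ls.getD k "" := by
          rw [List.getD_eq_getElem?_getD, List.getD_eq_getElem?_getD, hGe]
        rw [hCd, hGe]
        by_cases hC : PySem.Str.startswith (ls.getD k "") "CONECT" = true
        · by_cases hin : a ≤ (k:Int) ∧ (k:Int) < b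
          · rw [if_pos ⟨by omega, hin.2, hC⟩, if_pos ⟨hin.1, hin.2, hC⟩]
          · rw [if_neg (by omega), if_neg (by omega)]
        · rw [if_neg (by tauto), if_neg (by tauto)]
    · rw [PySem.List.pyRange_one_eq_nil (by omega), List.foldl_nil, if_neg (by omega)]

theorem pv_models_sorted (lines : List String) : (pvModels lines).Pairwise (· < ·) := by
  exact List.Pairwise.map _ (fun a b h => h)
    ((PySem.List.pairwise_lt_enumerate lines 0).filter _)

theorem pv_mem_models_iff (lines : List String) (i : Int) :
    i ∈ pvModels lines ↔ ∃ j : Nat, i = (j : Int) ∧ ∃ h : j < lines.length,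
      PySem.Str.startswith lines[j] "MODEL" = true := by
  unfold pvModels
  simp [List.mem_filter, PySem.List.mem_enumerate_iff]

theorem pv_getD_lt (ms : List Int) (h : ms.Pairwise (· < ·)) (i j : Nat)
    (hij : i < j) (hj : j < ms.length) : ms.getD i 0 < ms.getD j 0 := by
  have hi : i < ms.length := by omega
  rw [List.getD_eq_getElem?_getD, List.getD_eq_getElem?_getD,
    List.getElem?_eq_getElem hi, List.getElem?_eq_getElem hj]
  exact (List.pairwise_iff_getElem.1 h) i j hi hj hij

theorem pv_models_nonneg (lines : List String) (i : Nat)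
    (hi : i < (pvModels lines).length) : 0 ≤ (pvModels lines).getD i 0 := by
  have hm : (pvModels lines).getD i 0 ∈ pvModels lines := by
    rw [List.getD_eq_getElem?_getD, List.getElem?_eq_getElem hi]
    exact List.getElem_mem hi
  obtain ⟨j, hj, _⟩ := (pv_mem_models_iff lines _).1 hm
  omega

theorem pv_outer_get (lines : List String) :
    ∀ (u : Nat), 1 ≤ u → u < (pvModels lines).length → ∀ (k : Nat),
    ((PySem.List.pyRange 0 (u : Int) 1).foldl
      (fun ls i =>
        (PySem.List.pyRange (PySem.List.pyGetD (pvModels lines) i 0)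
          (PySem.List.pyGetD (pvModels lines) (i + 1) 0) 1).foldl pvInner ls)
      lines)[k]? =
      if (pvModels lines).getD 0 0 ≤ (k : Int) ∧
          (k : Int) < (pvModels lines).getD u 0 ∧
          PySem.Str.startswith (lines.getD k "") "CONECT" = true
      then some "" else lines[k]? := by
  intro u
  induction u with
  | zero => omega
  | succ u ih =>
    intro _ hu k
    by_cases hu1 : 1 ≤ u
    · -- peel the last pair
      have hcast : ((u + 1 : Nat) : Int) = (u : Int) + 1 := by push_cast; ring
      rw [hcast, PySem.List.pyRange_one_succ_right (by omega), List.foldl_append,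
        List.foldl_cons, List.foldl_nil]
      have hg1 : PySem.List.pyGetD (pvModels lines) (u : Int) 0
          = (pvModels lines).getD u 0 := PySem.List.pyGetD_natCast _ _ _
      have hg2 : PySem.List.pyGetD (pvModels lines) ((u : Int) + 1) 0
          = (pvModels lines).getD (u + 1) 0 := by
        rw [← hcast]; exact PySem.List.pyGetD_natCast _ _ _
      rw [hg1, hg2, pv_inner_get ((pvModels lines).getD (u+1) 0
          - (pvModels lines).getD u 0).toNat _ _ (pv_models_nonneg lines u (by omega)) (by omega)]
      have hprev := fun m => ih hu1 (by omega) m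
      have h0u : (pvModels lines).getD 0 0 ≤ (pvModels lines).getD u 0 :=
        le_of_lt (pv_getD_lt _ (pv_models_sorted lines) 0 u (by omega) (by omega))
      have huu : (pvModels lines).getD u 0 < (pvModels lines).getD (u+1) 0 :=
        pv_getD_lt _ (pv_models_sorted lines) u (u+1) (by omega) (by omega)
      -- the prefix-fold value at k, as getD
      have hprevD : ∀ m : Nat, (pvModels lines).getD u 0 ≤ (m : Int) →
          ((PySem.List.pyRange 0 (u : Int) 1).foldl
            (fun ls i =>
              (PySem.List.pyRange (PySem.List.pyGetD (pvModels lines) i 0)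
                (PySem.List.pyGetD (pvModels lines) (i + 1) 0) 1).foldl pvInner ls)
            lines).getD m "" = lines.getD m "" := by
        intro m hm
        rw [List.getD_eq_getElem?_getD, List.getD_eq_getElem?_getD, hprev m,
          if_neg (by omega)]
      by_cases hk : (pvModels lines).getD u 0 ≤ (k : Int)
      · rw [hprevD k hk]
        by_cases hC : PySem.Str.startswith (lines.getD k "") "CONECT" = true
        · by_cases hkb : (k : Int) < (pvModels lines).getD (u+1) 0
          · rw [if_pos ⟨hk, hkb, hC⟩, if_pos ⟨by omega, hkb, hC⟩]
          · rw [if_neg (by tauto), hprev k, if_neg (by omega), if_neg (by tauto)]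
        · rw [if_neg (by tauto), hprev k, if_neg (by tauto), if_neg (by tauto)]
      · rw [if_neg (by omega), hprev k]
        by_cases hC : PySem.Str.startswith (lines.getD k "") "CONECT" = true
        · by_cases hk0 : (pvModels lines).getD 0 0 ≤ (k : Int)
          · rw [if_pos ⟨hk0, by omega, hC⟩, if_pos ⟨hk0, by omega, hC⟩]
          · rw [if_neg (by tauto), if_neg (by tauto)]
        · rw [if_neg (by tauto), if_neg (by tauto)]
    · -- u = 0 : the base case u + 1 = 1
      have hu0 : u = 0 := by omega
      subst hu0
      have h1 : ((1 : Nat) : Int) = (0 : Int) + 1 := by norm_num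
      rw [h1, PySem.List.pyRange_one_singleton, List.foldl_cons, List.foldl_nil]
      have hg1 : PySem.List.pyGetD (pvModels lines) (0 : Int) 0
          = (pvModels lines).getD 0 0 := PySem.List.pyGetD_zero _ _
      have hg2 : PySem.List.pyGetD (pvModels lines) ((0 : Int) + 1) 0
          = (pvModels lines).getD 1 0 := by
        have : ((0 : Int) + 1) = ((1 : Nat) : Int) := by norm_num
        rw [this]; exact PySem.List.pyGetD_natCast _ _ _
      rw [hg1, hg2, pv_inner_get ((pvModels lines).getD 1 0
          - (pvModels lines).getD 0 0).toNat _ _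
        (pv_models_nonneg lines 0 (by omega)) (le_refl _)]

theorem pv_last_fold : ∀ (xs : List String) (s acc : Int),
    (PySem.List.enumerate xs s).foldl
      (fun acc p => if PySem.Str.startswith p.2 "MODEL" then p.1 else acc) acc
    = (((PySem.List.enumerate xs s).filter
        (fun p => PySem.Str.startswith p.2 "MODEL")).map (fun p => p.1)).getLastD acc := by
  intro xs
  induction xs with
  | nil => intro s acc; simp [PySem.List.enumerate_nil]
  | cons x xs ih =>
    intro s acc
    rw [PySem.List.enumerate_cons, List.foldl_cons, List.filter_cons]
    by_cases h : PySem.Str.startswith x "MODEL" = true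
    · rw [if_pos h, if_pos h, List.map_cons, List.getLastD_cons, ih]
    · rw [if_neg h, if_neg h, ih]

theorem pv_B_loop (last : Int) : ∀ (xs : List String) (s : Int) (acc : List String) (b : Bool),
    ((PySem.List.enumerate xs s).foldl
      (fun (st : List String × Bool) p =>
        let seen := st.2 || PySem.Str.startswith p.2 "MODEL"
        if seen && decide (p.1 < last) && PySem.Str.startswith p.2 "CONECT"
        then (st.1 ++ [""], seen) else (st.1 ++ [p.2], seen))
      (acc, b)).1 = acc ++ pvBspec last xs s b := by
  intro xs
  induction xs with
  | nil => intro s acc b; simp [PySem.List.enumerate_nil, pvBspec]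
  | cons x xs ih =>
    intro s acc b
    rw [PySem.List.enumerate_cons, List.foldl_cons]
    show ((PySem.List.enumerate xs (s+1)).foldl _
      (if (b || PySem.Str.startswith x "MODEL") && decide (s < last) && PySem.Str.startswith x "CONECT"
       then (acc ++ [""], b || PySem.Str.startswith x "MODEL")
       else (acc ++ [x], b || PySem.Str.startswith x "MODEL"))).1 = _
    cases h : ((b || PySem.Str.startswith x "MODEL") && decide (s < last) && PySem.Str.startswith x "CONECT") with
    | true =>
      rw [if_pos rfl, ih]
      have hb : pvBspec last (x :: xs) s b
          = "" :: pvBspec last xs (s+1) (b || PySem.Str.startswith x "MODEL") := by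
        simp only [pvBspec]
        rw [if_pos h]
      rw [hb]
      simp
    | false =>
      rw [if_neg (by simp), ih]
      have hb : pvBspec last (x :: xs) s b
          = x :: pvBspec last xs (s+1) (b || PySem.Str.startswith x "MODEL") := by
        simp only [pvBspec]
        rw [if_neg (by rw [h]; simp)]
      rw [hb]
      simp

theorem pv_bspec_get (last : Int) : ∀ (xs : List String) (s : Int) (b : Bool) (k : Nat),
    (pvBspec last xs s b)[k]? = (xs[k]?).map (fun x =>
      if (b || ((xs.take (k + 1)).any (fun y => PySem.Str.startswith y "MODEL")))
          && decide (s + (k : Int) < last) && PySem.Str.startswith x "CONECT"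
      then "" else x) := by
  intro xs
  induction xs with
  | nil => intro s b k; simp [pvBspec]
  | cons x xs ih =>
    intro s b k
    cases k with
    | zero =>
      simp [pvBspec]
    | succ k =>
      show (pvBspec last xs (s + 1) (b || PySem.Str.startswith x "MODEL"))[k]? = _
      rw [ih]
      have h1 : (x :: xs)[k+1]? = xs[k]? := rfl
      rw [h1]
      have h2 : ((x :: xs).take (k + 1 + 1)).any (fun y => PySem.Str.startswith y "MODEL")
          = (PySem.Str.startswith x "MODEL" || (xs.take (k+1)).any (fun y => PySem.Str.startswith y "MODEL")) := by
        simp [List.take_succ_cons]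
      rw [h2]
      congr 1
      funext y
      have h3 : (s + 1) + (k : Int) = s + ((k : Nat) + 1 : Nat) := by push_cast; ring
      rw [h3]
      simp [Bool.or_assoc]

theorem pv_any_take_iff (lines : List String) (k : Nat) :
    ((lines.take (k + 1)).any (fun y => PySem.Str.startswith y "MODEL")) = true ↔
      ∃ j : Nat, j ≤ k ∧ ((j : Int) ∈ pvModels lines) := by
  rw [List.any_eq_true]
  constructor
  · rintro ⟨y, hy, hP⟩
    obtain ⟨j, hj, rfl⟩ := List.mem_take_iff_getElem.1 hy
    exact ⟨j, by omega, (pv_mem_models_iff lines _).2 ⟨j, rfl, by omega, hP⟩⟩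
  · rintro ⟨j, hjk, hmem⟩
    obtain ⟨j', hj'eq, hlen, hP⟩ := (pv_mem_models_iff lines _).1 hmem
    have : j' = j := by omega
    subst this
    exact ⟨lines[j'], List.mem_take_iff_getElem.2 ⟨j', by omega, rfl⟩, hP⟩

theorem pv_head_min (lines : List String) (i : Int) (h : i ∈ pvModels lines) :
    (pvModels lines).getD 0 0 ≤ i := by
  obtain ⟨t, ht, rfl⟩ := List.mem_iff_getElem.1 h
  rcases Nat.eq_zero_or_pos t with h0 | h0
  · subst h0
    rw [List.getD_eq_getElem?_getD, List.getElem?_eq_getElem (by omega)]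
    simp
  · have := pv_getD_lt _ (pv_models_sorted lines) 0 t h0 ht
    rw [List.getD_eq_getElem?_getD (l := pvModels lines) (i := t),
      List.getElem?_eq_getElem ht] at this
    simpa using le_of_lt this

theorem pv_le_last (lines : List String) (i : Int) (h : i ∈ pvModels lines) :
    i ≤ (pvModels lines).getD ((pvModels lines).length - 1) 0 := by
  obtain ⟨t, ht, rfl⟩ := List.mem_iff_getElem.1 h
  rcases Nat.lt_or_ge t ((pvModels lines).length - 1) with hlt | hge
  · have := pv_getD_lt _ (pv_models_sorted lines) t ((pvModels lines).length - 1) hlt (by omega)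
    rw [List.getD_eq_getElem?_getD (l := pvModels lines) (i := t),
      List.getElem?_eq_getElem ht] at this
    simpa using le_of_lt this
  · have : t = (pvModels lines).length - 1 := by omega
    subst this
    rw [List.getD_eq_getElem?_getD, List.getElem?_eq_getElem ht]
    simp

theorem pv_lastD_eq (lines : List String) (h : pvModels lines ≠ []) :
    (pvModels lines).getLastD (-1)
      = (pvModels lines).getD ((pvModels lines).length - 1) 0 := by
  rw [List.getLastD_eq_getLast? , List.getLast?_eq_getElem?,
    List.getD_eq_getElem?_getD, List.getElem?_eq_getElem (by
      have := List.length_pos_iff.2 h; omega)]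
  simp

theorem pv_main : ∀ (lines : List String),
    remove_conect_lines_except_last_model lines
      = remove_conect_lines_except_last_model_alt lines := by
  intro lines
  -- B side
  have hBdef : remove_conect_lines_except_last_model_alt lines
      = pvBspec ((pvModels lines).getLastD (-1)) lines 0 false := by
    show ((PySem.List.enumerate lines).foldl _ ([], false)).1 = _
    rw [show ((PySem.List.enumerate lines).foldl
        (fun acc p => if PySem.Str.startswith p.2 "MODEL" then p.1 else acc) (-1))
        = (pvModels lines).getLastD (-1) from pv_last_fold lines 0 (-1)]
    rw [pv_B_loop _ lines 0 [] false, List.nil_append]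
  rw [hBdef]
  unfold remove_conect_lines_except_last_model
  rw [show ((PySem.List.enumerate lines).filter
      (fun p => PySem.Str.startswith p.2 "MODEL")).map (fun p => p.1) = pvModels lines from rfl]
  by_cases hL : (pvModels lines).length < 2
  · rw [if_pos hL]
    apply List.ext_getElem?
    intro k
    rw [pv_bspec_get]
    cases hx : lines[k]? with
    | none => rfl
    | some x =>
      simp only [Option.map_some]
      congr 1
      by_cases hany : ((lines.take (k + 1)).any (fun y => PySem.Str.startswith y "MODEL")) = true
      · obtain ⟨j, hjk, hmem⟩ := (pv_any_take_iff lines k).1 hany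
        -- fewer than 2 models: last model is ≤ k, so decide (0 + k < last) is false
        have hne : pvModels lines ≠ [] := by
          intro hnil; rw [hnil] at hmem; exact absurd hmem (List.not_mem_nil)
        have hlast : (pvModels lines).getLastD (-1)
            = (pvModels lines).getD ((pvModels lines).length - 1) 0 := pv_lastD_eq lines hne
        have hle : (j : Int) ≤ (pvModels lines).getD ((pvModels lines).length - 1) 0 :=
          pv_le_last lines _ hmem
        -- with length ≤ 1 the last model IS the one at index ≥ the head; but we need last ≤ k:
        -- length = 1 so every member equals the last element
        have hlen1 : (pvModels lines).length = 1 := by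
          have := List.length_pos_iff.2 hne; omega
        have hmem' : (pvModels lines).getD ((pvModels lines).length - 1) 0 ∈ pvModels lines := by
          rw [List.getD_eq_getElem?_getD, List.getElem?_eq_getElem (by omega)]
          exact List.getElem_mem _
        obtain ⟨j', hj'eq, hlen', hP'⟩ := (pv_mem_models_iff lines _).1 hmem'
        obtain ⟨j2, hj2eq, hlen2, hP2⟩ := (pv_mem_models_iff lines _).1 hmem
        -- both are elements of a 1-element list, hence equal
        have huniq : (j : Int) = (pvModels lines).getD ((pvModels lines).length - 1) 0 := by
          obtain ⟨t, ht, hteq⟩ := List.mem_iff_getElem.1 hmem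
          have ht0 : t = 0 := by omega
          subst ht0
          rw [List.getD_eq_getElem?_getD, show (pvModels lines).length - 1 = 0 from by omega,
            List.getElem?_eq_getElem (by omega)]
          simpa using hteq.symm
        have hdec : decide ((0 : Int) + (k : Nat) < (pvModels lines).getLastD (-1)) = false := by
          rw [hlast]
          simp only [decide_eq_false_iff_not, not_lt]
          omega
        rw [hdec]
        simp
      · rw [Bool.eq_false_iff.2 hany]  -- placeholder; fix below
        simp
  · -- at least two models
    rw [if_neg hL]
    have hne : pvModels lines ≠ [] := by
      intro hnil
      rw [hnil] at hL
      simp at hL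
    have hlast : (pvModels lines).getLastD (-1)
        = (pvModels lines).getD ((pvModels lines).length - 1) 0 := pv_lastD_eq lines hne
    have hcast : (((pvModels lines).length : Int) - 1)
        = (((pvModels lines).length - 1 : Nat) : Int) := by omega
    rw [hcast]
    show ((PySem.List.pyRange 0 (((pvModels lines).length - 1 : Nat) : Int) 1).foldl
      (fun ls i =>
        (PySem.List.pyRange (PySem.List.pyGetD (pvModels lines) i 0)
          (PySem.List.pyGetD (pvModels lines) (i + 1) 0) 1).foldl pvInner ls)
      lines) = pvBspec ((pvModels lines).getLastD (-1)) lines 0 false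
    apply List.ext_getElem?
    intro k
    rw [pv_outer_get lines ((pvModels lines).length - 1) (by omega) (by omega) k,
      pv_bspec_get]
    cases hx : lines[k]? with
    | none =>
      have hC : PySem.Str.startswith (lines.getD k "") "CONECT" = false := by
        rw [List.getD_eq_getElem?_getD, hx]
        exact pv_C_empty
      rw [if_neg (fun h => Bool.eq_false_iff.1 hC h.2.2)]
      simp
    | some x =>
      obtain ⟨hk, hkx⟩ := List.getElem?_eq_some_iff.1 hx
      have hgd : lines.getD k "" = x := by
        rw [List.getD_eq_getElem?_getD, hx]; rfl
      simp only [Option.map_some]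
      rw [hgd, hlast]
      by_cases hC : PySem.Str.startswith x "CONECT" = true
      · by_cases hany : ((lines.take (k + 1)).any (fun y => PySem.Str.startswith y "MODEL")) = true
        · -- some model at or before k: head model ≤ k
          obtain ⟨j, hjk, hmem⟩ := (pv_any_take_iff lines k).1 hany
          have h0k : (pvModels lines).getD 0 0 ≤ (k : Int) :=
            le_trans (pv_head_min lines _ hmem) (by omega)
          by_cases hkb : (k : Int) < (pvModels lines).getD ((pvModels lines).length - 1) 0
          · rw [if_pos ⟨h0k, hkb, hC⟩, hany]
            have : decide ((0 : Int) + (k : Nat) < (pvModels lines).getD ((pvModels lines).length - 1) 0) = true := by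
              simp only [decide_eq_true_iff]; omega
            rw [this, hC]
            simp
          · rw [if_neg (by tauto)]
            have : decide ((0 : Int) + (k : Nat) < (pvModels lines).getD ((pvModels lines).length - 1) 0) = false := by
              simp only [decide_eq_false_iff_not]; omega
            rw [this]
            simp
        · -- no model before k: head model > k
          have h0k : ¬ (pvModels lines).getD 0 0 ≤ (k : Int) := by
            intro hle0
            apply hany
            apply (pv_any_take_iff lines k).2
            have hmem0 : (pvModels lines).getD 0 0 ∈ pvModels lines := by
              rw [List.getD_eq_getElem?_getD, List.getElem?_eq_getElem (by omega)]
              exact List.getElem_mem _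
            obtain ⟨j0, hj0eq, hl0, hP0⟩ := (pv_mem_models_iff lines _).1 hmem0
            refine ⟨j0, by omega, ?_⟩
            rw [← hj0eq]
            exact hmem0
          rw [if_neg (by tauto), Bool.eq_false_iff.2 hany]
          simp
      · rw [if_neg (by tauto), Bool.eq_false_iff.2 hC]
        simp

-- ===== VERDICT (by name: the statement is the Claim_ definition above) =====
theorem remove_conect_lines_except_last_model_spec : Claim_equal_remove_conect_lines_except_last_model := by
  intro lines _
  unfold Spec_remove_conect_lines_except_last_model
  exact pv_main lines
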